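-- pv_equiv track=rewrite | github.com/SuryaTalla22/Certified-Golden-Maximality-for-Invariant-Circle-Thresholds-in-Conservative-Twist-Maps | code_repository/kam_theorem_suite/arithmetic.py | generate_periodic_classes
-- ===== SOURCE A (Python) =====
-- from itertools import product
-- from typing import Iterable, List, Sequence, Tuple
--
-- def generate_periodic_classes(
--     max_digit: int = 5,
--     max_period: int = 4,
--     include_golden: bool = True,
--     primitive_only: bool = True,
-- ) -> List[Tuple[Tuple[int, ...], Tuple[int, ...]]]:
--     out: List[Tuple[Tuple[int, ...], Tuple[int, ...]]] = []
--     seen = set()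
--     if include_golden:
--         golden = (tuple(), (1,))
--         out.append(golden)
--         seen.add(golden)
--     for L in range(1, max_period + 1):
--         for period in product(range(1, max_digit + 1), repeat=L):
--             if primitive_only:
--                 ok = True
--                 for s in range(1, L):
--                     if L % s == 0 and period == period[:s] * (L // s):
--                         ok = False
--                         break
--                 if not ok:
--                     continue
--             item = (tuple(), tuple(period))
--             if item in seen:
--                 continue
--             out.append(item)
--             seen.add(item)
--     return out
-- ===== SOURCE B (Python) =====
-- def generate_periodic_classes(
--     max_digit: int = 5,
--     max_period: int = 4,
--     include_golden: bool = True,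
--     primitive_only: bool = True,
-- ):
--     def words(L):
--         if L == 0:
--             return [()]
--         return [(d,) + w
--                 for d in range(1, max_digit + 1)
--                 for w in words(L - 1)]
--
--     def primitive(p):
--         doubled = p + p
--         return all(doubled[i:i + len(p)] != p for i in range(1, len(p)))
--
--     return ([((), (1,))] if include_golden else []) + [
--         ((), p)
--         for L in range(1, max_period + 1)
--         for p in words(L)
--         if not (primitive_only and not primitive(p))
--         and not (include_golden and p == (1,))
--     ]
-- ===== Notes on version B (the rewrite author's own statement) =====
-- stated objective: alternative
-- what changed: Replaces the divisor-scanning primitivity test with a single-pass rotation test on the doubled tuple (a tuple is primitive iff no proper shift of its doubling reproduces it), generates the digit words by prefix recursion instead of itertools.product, and drops the seen-set deduplication in favour of one comprehension that explicitly skips the length-one golden tuple.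
import Mathlib
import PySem

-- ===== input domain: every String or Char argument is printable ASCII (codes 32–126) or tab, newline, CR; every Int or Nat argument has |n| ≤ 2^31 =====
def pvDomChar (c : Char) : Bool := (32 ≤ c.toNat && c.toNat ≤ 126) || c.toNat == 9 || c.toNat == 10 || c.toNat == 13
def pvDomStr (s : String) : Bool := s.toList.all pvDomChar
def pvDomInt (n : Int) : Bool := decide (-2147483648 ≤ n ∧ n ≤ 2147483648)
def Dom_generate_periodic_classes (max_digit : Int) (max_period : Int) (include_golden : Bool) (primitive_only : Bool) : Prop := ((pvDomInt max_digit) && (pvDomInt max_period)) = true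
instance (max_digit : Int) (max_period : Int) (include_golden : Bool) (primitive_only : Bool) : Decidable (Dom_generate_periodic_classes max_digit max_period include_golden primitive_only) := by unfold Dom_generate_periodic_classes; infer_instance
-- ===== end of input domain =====

-- B replaces A's divisor-scanning primitivity test by a rotation test on the doubled tuple,
-- generates the digit words by prefix recursion instead of itertools.product's iterative
-- extension, and drops the seen-set in favour of one comprehension that skips the golden (1,)
-- explicitly (objective: alternative, same asymptotic cost).


-- ===== PORT A =====

-- itertools.product(pool, repeat=L), as CPython documents it:
-- result = [[]]; for each of the L pools: result = [x+[y] for x in result for y in pool]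
def pyProduct (pool : List Int) (L : Nat) : List (List Int) :=
  (List.range L).foldl (fun result _ => result.flatMap (fun x => pool.map (fun y => x ++ [y]))) [[]]

-- A's inner primitivity scan: for s in range(1, L): if L % s == 0 and period == period[:s] * (L // s): ok = False
def okA (L : Int) (period : List Int) : Bool :=
  (PySem.List.pyRange 1 L 1).foldl (fun ok s =>
    if PySem.Int.mod L s == 0 &&
       period == PySem.List.pyRepeat (PySem.List.slice period none (some s)) (PySem.Int.floordiv L s)
    then false else ok) true

def generate_periodic_classes (max_digit : Int) (max_period : Int) (include_golden : Bool) (primitive_only : Bool) : List (List Int × List Int) :=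
  let st0 : List (List Int × List Int) × PySem.Set (List Int × List Int) :=
    if include_golden then
      ([(([] : List Int), ([1] : List Int))],
       PySem.Set.add PySem.Set.empty (([] : List Int), ([1] : List Int)))
    else ([], PySem.Set.empty)
  let st := (PySem.List.pyRange 1 (max_period + 1) 1).foldl (fun st L =>
    (pyProduct (PySem.List.pyRange 1 (max_digit + 1) 1) L.toNat).foldl (fun st period =>
      if primitive_only && !okA L period then st
      else
        let item := (([] : List Int), period)
        if PySem.Set.contains st.2 item then st
        else (st.1 ++ [item], PySem.Set.add st.2 item)) st) st0
  st.1

-- ===== PORT B =====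

-- all length-n words over `digits`, built by prefix recursion (lexicographic order)
def wordsB (digits : List Int) : Nat → List (List Int)
  | 0 => [[]]
  | n + 1 => digits.flatMap (fun d => (wordsB digits n).map (fun w => d :: w))

-- p is primitive iff no proper shift of the doubled tuple reproduces p
def primitiveB (p : List Int) : Bool :=
  let doubled := p ++ p
  (PySem.List.pyRange 1 (PySem.List.len p) 1).all (fun i =>
    !(PySem.List.slice doubled (some i) (some (i + PySem.List.len p)) == p))

def generate_periodic_classes_alt (max_digit : Int) (max_period : Int) (include_golden : Bool) (primitive_only : Bool) : List (List Int × List Int) :=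
  (if include_golden then [(([] : List Int), ([1] : List Int))] else []) ++
  (PySem.List.pyRange 1 (max_period + 1) 1).flatMap (fun L =>
    ((wordsB (PySem.List.pyRange 1 (max_digit + 1) 1) L.toNat).filter (fun p =>
      !(primitive_only && !primitiveB p) && !(include_golden && p == [1]))).map
      (fun p => (([] : List Int), p)))

-- ===== PRECONDITION & SPEC =====
def Spec_generate_periodic_classes (max_digit : Int) (max_period : Int) (include_golden : Bool) (primitive_only : Bool) (out : List (List Int × List Int)) : Prop := out = generate_periodic_classes_alt max_digit max_period include_golden primitive_only
instance (max_digit : Int) (max_period : Int) (include_golden : Bool) (primitive_only : Bool) (out : List (List Int × List Int)) : Decidable (Spec_generate_periodic_classes max_digit max_period include_golden primitive_only out) := by unfold Spec_generate_periodic_classes; infer_instance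

-- ===== CLAIM (what is proved, stated in full; the proofs are below) =====
def Claim_equal_generate_periodic_classes : Prop := ∀ (max_digit : Int) (max_period : Int) (include_golden : Bool) (primitive_only : Bool), Dom_generate_periodic_classes max_digit max_period include_golden primitive_only → Spec_generate_periodic_classes max_digit max_period include_golden primitive_only (generate_periodic_classes max_digit max_period include_golden primitive_only)

-- ===== LEMMAS AND PROOFS =====

-- ---- generation: itertools.product's iterative extension = prefix recursion ----

theorem wordsB_step (digits : List Int) (n : Nat) :
    (wordsB digits n).flatMap (fun x => digits.map (fun y => x ++ [y])) = wordsB digits (n + 1) := by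
  induction n with
  | zero => simp [wordsB, ← List.map_eq_flatMap]
  | succ n ih =>
    conv_lhs => rw [wordsB]
    rw [List.flatMap_assoc]
    conv_rhs => rw [wordsB]
    congr 1
    funext d
    conv_rhs => rw [← ih, List.map_flatMap]
    simp only [List.map_map]
    rw [List.flatMap_map]
    rfl

theorem pyProduct_eq_wordsB (digits : List Int) (n : Nat) :
    pyProduct digits n = wordsB digits n := by
  induction n with
  | zero => simp [pyProduct, wordsB]
  | succ n ih =>
    unfold pyProduct at *
    rw [List.range_succ, List.foldl_append, List.foldl_cons, List.foldl_nil, ih, wordsB_step]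

theorem length_of_mem_wordsB {digits : List Int} {n : Nat} {p : List Int}
    (h : p ∈ wordsB digits n) : p.length = n := by
  induction n generalizing p with
  | zero => simp [wordsB] at h; simp [h]
  | succ n ih =>
    simp [wordsB] at h
    obtain ⟨d, _, w, hw, rfl⟩ := h
    simp [ih hw]

theorem nodup_wordsB {digits : List Int} (hnd : digits.Nodup) (n : Nat) :
    (wordsB digits n).Nodup := by
  induction n with
  | zero => simp [wordsB]
  | succ n ih =>
    rw [wordsB, List.nodup_flatMap]
    refine ⟨fun d _ => ih.map (fun a b h => by simpa using h), ?_⟩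
    refine hnd.imp ?_
    intro a b hab x hx hy
    simp at hx hy
    obtain ⟨w, _, rfl⟩ := hx
    obtain ⟨w', _, h'⟩ := hy
    injection h' with h1 _
    exact hab h1.symm

-- ---- the rotation ↔ divisor-period equivalence ----

theorem flatten_replicate_rotate (w : List Int) (k : Nat) :
    ((List.replicate (k + 1) w).flatten).rotate w.length = (List.replicate (k + 1) w).flatten := by
  have h1 : (List.replicate (k + 1) w).flatten = w ++ (List.replicate k w).flatten := by
    rw [List.replicate_succ, List.flatten_cons]
  have h2 : (List.replicate (k + 1) w).flatten = (List.replicate k w).flatten ++ w := by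
    rw [List.replicate_succ', List.flatten_append]; simp
  rw [h1, List.rotate_eq_drop_append_take (by simp), List.drop_left, List.take_left, ← h2, h1]

theorem exists_mul_mod_eq_gcd {t n : Nat} (ht : 0 < t) (hlt : Nat.gcd t n < n) :
    ∃ m : Nat, (m * t) % n = Nat.gcd t n := by
  have hn : 0 < n := lt_of_le_of_lt (Nat.zero_le _) hlt
  have hnz : (n : ℤ) ≠ 0 := by exact_mod_cast hn.ne'
  have hb := Nat.gcd_eq_gcd_ab t n
  set a := Nat.gcdA t n with ha
  set b := Nat.gcdB t n with hbb
  refine ⟨(a % n).toNat, ?_⟩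
  have h0 : (0:ℤ) ≤ a % n := Int.emod_nonneg a hnz
  have key : (((a % n).toNat : ℤ) * t) % n = (Nat.gcd t n : ℤ) := by
    rw [Int.toNat_of_nonneg h0]
    have e1 : (a % n * t) % n = (a * t) % n := by
      conv_rhs => rw [Int.mul_emod, ← Int.emod_emod_of_dvd a dvd_rfl, ← Int.mul_emod]
    have e2 : (a * t) % n = (Nat.gcd t n : ℤ) % n := by
      have : (Nat.gcd t n : ℤ) = a * t + n * b := by rw [hb]; ring
      rw [this]
      simp [Int.add_mul_emod_self_left]
    rw [e1, e2, Int.emod_eq_of_lt (by positivity) (by exact_mod_cast hlt)]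
  have hcast : ((((a % n).toNat * t) % n : ℕ) : ℤ) = (((a % n).toNat : ℤ) * t) % n := by
    push_cast; ring_nf
  exact Nat.cast_injective (hcast.trans key)

theorem rotate_gcd_of_rotate_eq {p : List Int} {t : Nat} (ht : 0 < t) (htn : t < p.length)
    (h : p.rotate t = p) : p.rotate (Nat.gcd t p.length) = p := by
  have hmul : ∀ m : Nat, p.rotate (m * t) = p := by
    intro m
    induction m with
    | zero => simp
    | succ m ih => rw [Nat.succ_mul, ← List.rotate_rotate, ih, h]
  have hglt : Nat.gcd t p.length < p.length := lt_of_le_of_lt (Nat.gcd_le_left _ ht) htn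
  obtain ⟨m, hm⟩ := exists_mul_mod_eq_gcd ht hglt
  rw [← hm, List.rotate_mod, hmul]

theorem eq_flatten_replicate_of_rotate (k : Nat) :
    ∀ (p : List Int) (g : Nat), 0 < g → p.length = k * g → p.rotate g = p →
      p = (List.replicate k (p.take g)).flatten := by
  induction k with
  | zero =>
    intro p g _ hlen _
    simp at hlen
    simp [hlen]
  | succ k ih =>
    intro p g hg hlen hrot
    have hglen : g ≤ p.length := by rw [hlen]; nlinarith
    have hw : (p.take g).length = g := by simp [hglen]
    have hq : (p.drop g).length = k * g := by simp [hlen, Nat.succ_mul]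
    have hsplit : p = p.take g ++ p.drop g := (List.take_append_drop g p).symm
    have hrot' : p.drop g ++ p.take g = p := by
      rw [← List.rotate_eq_drop_append_take hglen, hrot]
    have hcomm : p.drop g ++ p.take g = p.take g ++ p.drop g := by rw [hrot', ← hsplit]
    rcases Nat.eq_zero_or_pos k with hk | hk
    · subst hk
      have : p.drop g = [] := by rw [← List.length_eq_zero_iff, hq]; ring
      rw [List.replicate_one, List.flatten_cons, List.flatten_nil, List.append_nil]
      calc p = p.take g ++ p.drop g := hsplit
        _ = p.take g := by rw [this, List.append_nil]
    · have hgq : g ≤ (p.drop g).length := by rw [hq]; nlinarith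
      have htake : (p.drop g).take g = p.take g := by
        have := congrArg (List.take g) hcomm
        rwa [List.take_append, Nat.sub_eq_zero_of_le hgq, List.take_zero, List.append_nil,
          List.take_left' hw] at this
      have hdrop : (p.drop g).drop g ++ p.take g = p.drop g := by
        have := congrArg (List.drop g) hcomm
        rwa [List.drop_append_of_le_length hgq, List.drop_left' hw] at this
      have hqrot : (p.drop g).rotate g = p.drop g := by
        rw [List.rotate_eq_drop_append_take hgq, htake, hdrop]
      have hrec := ih (p.drop g) g hg hq hqrot
      rw [htake] at hrec
      calc p = p.take g ++ p.drop g := hsplit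
        _ = p.take g ++ (List.replicate k (p.take g)).flatten := by rw [← hrec]
        _ = (List.replicate (k + 1) (p.take g)).flatten := by
              rw [List.replicate_succ, List.flatten_cons]

theorem divisor_iff_rotate (p : List Int) :
    (∃ t : Nat, 1 ≤ t ∧ t < p.length ∧ t ∣ p.length ∧
        p = (List.replicate (p.length / t) (p.take t)).flatten) ↔
    (∃ t : Nat, 1 ≤ t ∧ t < p.length ∧ p.rotate t = p) := by
  constructor
  · rintro ⟨t, h1, h2, hdvd, heq⟩
    refine ⟨t, h1, h2, ?_⟩
    have hk : 1 ≤ p.length / t := (Nat.one_le_div_iff h1).mpr (le_of_lt h2)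
    have hw : (p.take t).length = t := by simp [le_of_lt h2]
    obtain ⟨k, hk2⟩ : ∃ k, p.length / t = k + 1 := ⟨p.length / t - 1, by omega⟩
    have hfix := flatten_replicate_rotate (p.take t) k
    rw [hw] at hfix
    rw [heq, hk2]
    exact hfix
  · rintro ⟨t, h1, h2, hrot⟩
    have hg1 : 0 < Nat.gcd t p.length := Nat.gcd_pos_of_pos_left _ h1
    have hrotg := rotate_gcd_of_rotate_eq h1 h2 hrot
    have hdvd : Nat.gcd t p.length ∣ p.length := Nat.gcd_dvd_right _ _
    have hglt : Nat.gcd t p.length < p.length := lt_of_le_of_lt (Nat.gcd_le_left _ h1) h2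
    have hlen : p.length = p.length / Nat.gcd t p.length * Nat.gcd t p.length :=
      (Nat.div_mul_cancel hdvd).symm
    exact ⟨_, hg1, hglt, hdvd, eq_flatten_replicate_of_rotate _ p _ hg1 hlen hrotg⟩

-- ---- the two Boolean tests agree on words of the right length ----

theorem pyRepeat_eq {α : Type} (xs : List α) (m : Int) :
    PySem.List.pyRepeat xs m = (List.replicate m.toNat xs).flatten := rfl

theorem double_slice_eq_rotate (p : List Int) (t : Nat) (ht : t ≤ p.length) :
    PySem.List.slice (p ++ p) (some (t : Int)) (some ((t : Int) + (p.length : Int))) = p.rotate t := by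
  have : ((t : Int) + (p.length : Int)) = ((t + p.length : Nat) : Int) := by push_cast; ring
  rw [this, PySem.List.slice_natCast, List.drop_append_of_le_length ht,
    List.rotate_eq_drop_append_take ht, Nat.add_sub_cancel_left, List.take_append]
  congr 1
  · exact List.take_of_length_le (by simp)
  · congr 1; simp; omega

theorem anyA_iff (p : List Int) :
    ((PySem.List.pyRange 1 (p.length : Int) 1).any (fun s =>
        PySem.Int.mod (p.length : Int) s == 0 &&
        p == PySem.List.pyRepeat (PySem.List.slice p none (some s)) (PySem.Int.floordiv (p.length : Int) s)) = true)
    ↔ (∃ t : Nat, 1 ≤ t ∧ t < p.length ∧ t ∣ p.length ∧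
        p = (List.replicate (p.length / t) (p.take t)).flatten) := by
  rw [List.any_eq_true]
  constructor
  · rintro ⟨s, hs, hcond⟩
    rw [PySem.List.mem_pyRange_one] at hs
    obtain ⟨hs1, hs2⟩ := hs
    lift s to ℕ using (by omega) with t
    simp only [Bool.and_eq_true, beq_iff_eq] at hcond
    obtain ⟨hmod, heq⟩ := hcond
    rw [PySem.Int.mod_eq_zero_iff_dvd] at hmod
    have hdvd : t ∣ p.length := by exact_mod_cast hmod
    refine ⟨t, by exact_mod_cast hs1, by exact_mod_cast hs2, hdvd, ?_⟩
    rw [PySem.List.slice_to_natCast, PySem.Int.floordiv_natCast, pyRepeat_eq] at heq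
    simpa using heq
  · rintro ⟨t, h1, h2, hdvd, heq⟩
    refine ⟨(t : Int), ?_, ?_⟩
    · rw [PySem.List.mem_pyRange_one]
      constructor <;> [exact_mod_cast h1; exact_mod_cast h2]
    · simp only [Bool.and_eq_true, beq_iff_eq]
      refine ⟨?_, ?_⟩
      · rw [PySem.Int.mod_eq_zero_iff_dvd]; exact_mod_cast hdvd
      · rw [PySem.List.slice_to_natCast, PySem.Int.floordiv_natCast, pyRepeat_eq]
        simpa using heq

theorem anyB_iff (p : List Int) :
    ((PySem.List.pyRange 1 (p.length : Int) 1).any (fun i =>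
        PySem.List.slice (p ++ p) (some i) (some (i + (p.length : Int))) == p) = true)
    ↔ (∃ t : Nat, 1 ≤ t ∧ t < p.length ∧ p.rotate t = p) := by
  rw [List.any_eq_true]
  constructor
  · rintro ⟨s, hs, hcond⟩
    rw [PySem.List.mem_pyRange_one] at hs
    obtain ⟨hs1, hs2⟩ := hs
    lift s to ℕ using (by omega) with t
    rw [beq_iff_eq, double_slice_eq_rotate p t (by exact_mod_cast le_of_lt hs2)] at hcond
    exact ⟨t, by exact_mod_cast hs1, by exact_mod_cast hs2, hcond⟩
  · rintro ⟨t, h1, h2, hrot⟩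
    refine ⟨(t : Int), ?_, ?_⟩
    · rw [PySem.List.mem_pyRange_one]
      constructor <;> [exact_mod_cast h1; exact_mod_cast h2]
    · rw [beq_iff_eq, double_slice_eq_rotate p t (le_of_lt h2)]
      exact hrot

theorem okA_eq_primitiveB {p : List Int} {L : Int} (hL : 1 ≤ L) (hlen : p.length = L.toNat) :
    okA L p = primitiveB p := by
  have hLeq : L = (p.length : Int) := by omega
  subst hLeq
  unfold okA primitiveB
  rw [PySem.List.foldl_if_false_eq]
  simp only [PySem.List.len_eq, List.all_eq_not_any_not, Bool.not_not, Bool.true_and]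
  congr 1
  rw [Bool.eq_iff_iff, anyA_iff, anyB_iff]
  exact divisor_iff_rotate p

-- ---- the seen-set fold appends exactly the not-yet-seen items ----

theorem contains_add_of_ne {α : Type} [BEq α] [LawfulBEq α] (s : PySem.Set α) {x i : α}
    (hxi : x ≠ i) : PySem.Set.contains (PySem.Set.add s i) x = PySem.Set.contains s x := by
  cases h1 : PySem.Set.contains s x
  · cases h2 : PySem.Set.contains (PySem.Set.add s i) x
    · rfl
    · rcases (PySem.Set.mem_add s i x).mp ((PySem.Set.contains_iff _ x).mp h2) with h | h
      · rw [(PySem.Set.contains_iff s x).mpr h] at h1; exact h1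
      · exact absurd h hxi
  · rw [(PySem.Set.contains_iff _ x).mpr ((PySem.Set.mem_add s i x).mpr (Or.inl ((PySem.Set.contains_iff s x).mp h1)))]

theorem seen_fold_eq_filter {α : Type} [BEq α] [LawfulBEq α] (items : List α)
    (out0 : List α) (s0 : PySem.Set α) (hnd : items.Nodup) :
    (items.foldl (fun st i =>
        if PySem.Set.contains st.2 i then st
        else (st.1 ++ [i], PySem.Set.add st.2 i)) (out0, s0)).1
      = out0 ++ items.filter (fun i => !PySem.Set.contains s0 i) := by
  induction items generalizing out0 s0 with
  | nil => simp
  | cons i rest ih =>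
    obtain ⟨hni, hrest⟩ := List.nodup_cons.mp hnd
    rw [List.foldl_cons, List.filter_cons]
    by_cases hc : PySem.Set.contains s0 i = true
    · rw [if_pos hc, ih _ _ hrest]
      have hmem : i ∈ s0 := (PySem.Set.contains_iff s0 i).mp hc
      simp [hmem]
    · rw [if_neg hc]
      have hstep : ((out0, s0).1 ++ [i], PySem.Set.add (out0, s0).2 i) = (out0 ++ [i], PySem.Set.add s0 i) := rfl
      rw [hstep, ih _ _ hrest]
      have hcong : rest.filter (fun x => !PySem.Set.contains (PySem.Set.add s0 i) x)
          = rest.filter (fun x => !PySem.Set.contains s0 x) := by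
        apply List.filter_congr
        intro x hx
        rw [contains_add_of_ne _ (fun h : x = i => hni (h ▸ hx))]
      rw [hcong]
      have hmem : i ∉ s0 := fun hm => hc ((PySem.Set.contains_iff s0 i).mpr hm)
      simp [hmem]

-- ===== VERDICT (by name: the statement is the Claim_ definition above) =====
theorem generate_periodic_classes_spec : Claim_equal_generate_periodic_classes := by
  intro md mp ig po _
  unfold Spec_generate_periodic_classes generate_periodic_classes generate_periodic_classes_alt
  simp only []
  have hdignd : (PySem.List.pyRange 1 (md + 1) 1).Nodup := PySem.List.nodup_pyRange_one 1 (md + 1)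
  -- rewrite A's inner fold over the product into a seen-fold over B's filtered, mapped words
  have inner : ∀ (st : List (List Int × List Int) × PySem.Set (List Int × List Int)) (L : Int),
      L ∈ PySem.List.pyRange 1 (mp + 1) 1 →
      List.foldl (fun st period =>
          if (po && !okA L period) = true then st
          else if st.2.contains (([] : List Int), period) = true then st
          else (st.1 ++ [(([] : List Int), period)], st.2.add (([] : List Int), period))) st
        (pyProduct (PySem.List.pyRange 1 (md + 1) 1) L.toNat)
      = List.foldl (fun st i =>
          if PySem.Set.contains st.2 i = true then st else (st.1 ++ [i], PySem.Set.add st.2 i)) st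
          (((wordsB (PySem.List.pyRange 1 (md + 1) 1) L.toNat).filter
              (fun p => !(po && !primitiveB p))).map (fun p => (([] : List Int), p))) := by
    intro st L hL
    rw [PySem.List.mem_pyRange_one] at hL
    rw [pyProduct_eq_wordsB]
    have hflip : (fun (st : List (List Int × List Int) × PySem.Set (List Int × List Int)) period =>
        if (po && !okA L period) = true then st
        else if st.2.contains (([] : List Int), period) = true then st
        else (st.1 ++ [(([] : List Int), period)], st.2.add (([] : List Int), period)))
      = (fun st period => if (!(po && !okA L period)) = true then
          (if st.2.contains (([] : List Int), period) = true then st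
           else (st.1 ++ [(([] : List Int), period)], st.2.add (([] : List Int), period))) else st) := by
      funext st q
      by_cases h : (po && !okA L q) = true <;> simp [h]
    rw [hflip, PySem.List.foldl_if_eq_foldl_filter, List.foldl_map]
    congr 1
    apply List.filter_congr
    intro q hq
    rw [okA_eq_primitiveB hL.1 (length_of_mem_wordsB hq)]
  rw [PySem.List.foldl_congr_mem _ _
      (fun st L => List.foldl (fun st i =>
          if PySem.Set.contains st.2 i = true then st else (st.1 ++ [i], PySem.Set.add st.2 i)) st
          (((wordsB (PySem.List.pyRange 1 (md + 1) 1) L.toNat).filter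
              (fun p => !(po && !primitiveB p))).map (fun p => (([] : List Int), p)))) _ inner,
    ← List.foldl_flatMap]
  -- the flattened item stream has no duplicates
  have hnodup : ((PySem.List.pyRange 1 (mp + 1) 1).flatMap (fun L =>
      ((wordsB (PySem.List.pyRange 1 (md + 1) 1) L.toNat).filter
          (fun p => !(po && !primitiveB p))).map (fun p => (([] : List Int), p)))).Nodup := by
    rw [List.nodup_flatMap]
    constructor
    · intro L _
      exact (((nodup_wordsB hdignd _).filter _).map (fun a b h => by simpa using h))
    · refine List.Pairwise.imp_of_mem ?_ (PySem.List.pairwise_lt_pyRange_one 1 (mp + 1))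
      intro L L' hL hL' hlt x hx hy
      rw [PySem.List.mem_pyRange_one] at hL hL'
      simp only [List.mem_map, List.mem_filter] at hx hy
      obtain ⟨w, hw, rfl⟩ := hx
      obtain ⟨w', hw', he⟩ := hy
      have h1 := length_of_mem_wordsB hw.1
      have h2 := length_of_mem_wordsB hw'.1
      have hww : w' = w := congrArg Prod.snd he
      subst hww
      omega
  rw [seen_fold_eq_filter _ _ _ hnodup]
  cases ig
  · -- no golden pair: the seen set starts empty and filters nothing
    simp only [Bool.false_eq_true, if_false, Bool.false_and, Bool.not_false, Bool.and_true,
      List.nil_append]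
    have : ∀ i : List Int × List Int, (!PySem.Set.contains PySem.Set.empty i) = true := fun _ => rfl
    rw [List.filter_congr (fun i _ => this i), List.filter_true]
  · -- golden pair: the seen set starts as {golden} and filters exactly (1,)
    simp only [if_true]
    have hadd : PySem.Set.add PySem.Set.empty (([] : List Int), ([1] : List Int))
        = [(([] : List Int), ([1] : List Int))] := rfl
    rw [hadd, List.filter_flatMap]
    congr 1
    apply List.flatMap_congr
    intro L _
    rw [List.filter_map, List.filter_filter]
    congr 1
    apply List.filter_congr
    intro q _
    have hcont : PySem.Set.contains [(([] : List Int), ([1] : List Int))] (([] : List Int), q)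
        = (q == [1]) := by
      rw [Bool.eq_iff_iff, PySem.Set.contains_iff]
      simp
    simp only [Function.comp, hcont]
    cases hq : (q == [1]) <;> cases hp : primitiveB q <;> cases po <;> simp
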